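-- pv_equiv track=rewrite | github.com/Benzoin96485/Enerzyme | enerzyme/models/ictp/o3/tensor_product.py | _get_n_paths
-- ===== SOURCE A (Python) =====
-- from typing import List, Optional, Dict, Tuple, Union
--
-- def _get_n_paths(in1_l_max: int,
--                  in2_l_max: int,
--                  out_l_max: int,
--                  in1_paths: Optional[List[int]] = None,
--                  in2_paths: Optional[List[int]] = None,
--                  symmetric_product: bool = False) -> int:
--     """Counts the number of re-coupling paths for Cartesian harmonics depending on the rank of input tensors
--     and the maximal rank of the expected output tensor.
--
--     We count the number of paths obtained by re-coupling Cartesian harmonics, but also paths obtained through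
--     re-coupling/contracting Cartesian harmonics in previous calculations.
--
--     Args:
--         in1_l_max (int): Maximal rotational order/rank of the first input tensor.
--         in2_l_max (int): Maximal rotational order/rank of the second input tensor.
--         out_l_max (int): Maximal rotational order/rank of the output tensor.
--         in1_paths (Optional[List[int]], optional): Number of contraction paths used to obtain the first input tensor.
--                                                    Defaults to None.
--         in2_paths (Optional[List[int]], optional): Number of contraction paths used to obtain the second input tensor.
--                                                    Defaults to None.
--         symmetric_product (bool, optional): If True, skip the calculation of symmetric contractions. Defaults to False.
--
--     Returns:
--         int: Total number of contraction paths.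
--     """
--     if in1_paths is None: in1_paths = [1 for _ in range(in1_l_max + 1)]
--     if in2_paths is None: in2_paths = [1 for _ in range(in2_l_max + 1)]
--
--     # input tensors have by default scalar features
--     n_paths = in1_paths[0] * in2_paths[0]
--
--     # count paths leading to l = 0
--     if in1_l_max > 0 and in2_l_max > 0: n_paths += in1_paths[1] * in2_paths[1]
--     if in1_l_max > 1 and in2_l_max > 1: n_paths += in1_paths[2] * in2_paths[2]
--     if in1_l_max > 2 and in2_l_max > 2: n_paths += in1_paths[3] * in2_paths[3]
--     if out_l_max == 0: return n_paths
--
--     # count paths leading to l = 1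
--     if in1_l_max > 0: n_paths += in1_paths[1] * in2_paths[0]
--     if in1_l_max > 1 and in2_l_max > 0: n_paths += in1_paths[2] * in2_paths[1]
--     if in1_l_max > 2 and in2_l_max > 1: n_paths += in1_paths[3] * in2_paths[2]
--     if not symmetric_product:
--         if in2_l_max > 0: n_paths += in1_paths[0] * in2_paths[1]
--         if in1_l_max > 0 and in2_l_max > 1: n_paths += in1_paths[1] * in2_paths[2]
--         if in1_l_max > 1 and in2_l_max > 2: n_paths += in1_paths[2] * in2_paths[3]
--     if out_l_max == 1: return n_paths
--
--     # count paths leading to l=2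
--     if in1_l_max > 1: n_paths += in1_paths[2] * in2_paths[0]
--     if in1_l_max > 0 and in2_l_max > 0: n_paths += in1_paths[1] * in2_paths[1]
--     if in1_l_max > 1 and in2_l_max > 1: n_paths += in1_paths[2] * in2_paths[2]
--     if in1_l_max > 2 and in2_l_max > 2: n_paths += in1_paths[3] * in2_paths[3]
--     if in1_l_max > 2 and in2_l_max > 0: n_paths += in1_paths[3] * in2_paths[1]
--     if not symmetric_product:
--         if in2_l_max > 1: n_paths += in1_paths[0] * in2_paths[2]
--         if in1_l_max > 0 and in2_l_max > 2: n_paths += in1_paths[1] * in2_paths[3]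
--     if out_l_max == 2: return n_paths
--
--     # count paths leading to l=3
--     if in1_l_max > 2: n_paths += in1_paths[3] * in2_paths[0]
--     if in1_l_max > 1 and in2_l_max > 0: n_paths += in1_paths[2] * in2_paths[1]
--     if in1_l_max > 2 and in2_l_max > 1: n_paths += in1_paths[3] * in2_paths[2]
--     if not symmetric_product:
--         if in2_l_max > 2: n_paths += in1_paths[0] * in2_paths[3]
--         if in1_l_max > 0 and in2_l_max > 1: n_paths += in1_paths[1] * in2_paths[2]
--         if in1_l_max > 1 and in2_l_max > 2: n_paths += in1_paths[2] * in2_paths[3]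
--     if out_l_max == 3: return n_paths
-- ===== SOURCE B (Python) =====
-- from typing import List, Optional
--
-- def _get_n_paths(in1_l_max: int,
--                  in2_l_max: int,
--                  out_l_max: int,
--                  in1_paths: Optional[List[int]] = None,
--                  in2_paths: Optional[List[int]] = None,
--                  symmetric_product: bool = False) -> int:
--     """Counts re-coupling contraction paths by the selection rule instead of unrolled branches:
--     a pair of input ranks (l1, l2) contributes to output rank out_l exactly when
--     |l1 - l2| <= out_l <= l1 + l2 and l1 + l2 + out_l is even (triangle + parity),
--     with symmetric products suppressing the pairs where l2 > l1.
--     Ranks are capped at 3; the scalar (l = 0) channel is always present."""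
--     if in1_paths is None: in1_paths = [1 for _ in range(in1_l_max + 1)]
--     if in2_paths is None: in2_paths = [1 for _ in range(in2_l_max + 1)]
--     cap1 = min(max(in1_l_max, 0), 3)
--     cap2 = min(max(in2_l_max, 0), 3)
--     n_paths = 0
--     for out_l in range(4):
--         for l1 in range(cap1 + 1):
--             for l2 in range(cap2 + 1):
--                 if symmetric_product and l2 > l1:
--                     continue
--                 if abs(l1 - l2) <= out_l <= l1 + l2 and (l1 + l2 + out_l) % 2 == 0:
--                     n_paths += in1_paths[l1] * in2_paths[l2]
--         if out_l == out_l_max: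
--             return n_paths
--     return None
-- ===== Notes on version B (the rewrite author's own statement) =====
-- stated objective: simpler
-- what changed: A's 22 hand-unrolled conditional additions across four copy-pasted rank blocks are replaced by one triple loop over output rank and the two input ranks guarded by the triangle-inequality + parity selection rule (with symmetric products suppressing l2 > l1 pairs), which generalises uniformly instead of enumerating cases.
import Mathlib
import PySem

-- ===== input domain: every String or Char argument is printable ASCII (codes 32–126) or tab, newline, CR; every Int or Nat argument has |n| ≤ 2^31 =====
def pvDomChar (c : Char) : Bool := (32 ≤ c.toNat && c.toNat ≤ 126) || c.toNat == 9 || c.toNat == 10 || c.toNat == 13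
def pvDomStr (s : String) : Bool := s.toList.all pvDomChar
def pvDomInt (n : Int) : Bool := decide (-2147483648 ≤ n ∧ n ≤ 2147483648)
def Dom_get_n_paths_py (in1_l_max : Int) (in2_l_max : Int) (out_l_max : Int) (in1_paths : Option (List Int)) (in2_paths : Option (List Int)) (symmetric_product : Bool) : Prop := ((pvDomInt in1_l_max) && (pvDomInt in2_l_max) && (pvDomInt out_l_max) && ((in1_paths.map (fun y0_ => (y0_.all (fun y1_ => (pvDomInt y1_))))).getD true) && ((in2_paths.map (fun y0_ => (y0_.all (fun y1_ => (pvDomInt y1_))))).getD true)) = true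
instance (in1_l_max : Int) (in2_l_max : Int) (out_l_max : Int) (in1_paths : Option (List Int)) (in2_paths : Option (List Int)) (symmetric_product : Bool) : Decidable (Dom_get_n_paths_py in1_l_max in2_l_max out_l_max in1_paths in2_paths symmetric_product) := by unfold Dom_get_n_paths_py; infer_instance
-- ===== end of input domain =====

-- B replaces A's 22 unrolled conditional additions by a triple loop over the output rank and the
-- two input ranks guarded by the triangle + parity selection rule (objective: simpler).

-- ===== PORT A =====
-- one 'if cond: n_paths += in1_paths[i] * in2_paths[j]' line of A
def pvLine (c : Bool) (p1 p2 : List Int) (i j : Int) (n : Int) : Option Int :=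
  if c then (PySem.List.pyGet? p1 i).bind (fun a => (PySem.List.pyGet? p2 j).map (fun b => n + a * b)) else some n

-- 'n_paths = in1_paths[0] * in2_paths[0]' and A's '# count paths leading to l = 0' section
def pvBlock0 (L1 L2 : Int) (p1 p2 : List Int) : Option Int :=
  (PySem.List.pyGet? p1 0).bind fun a0 =>
  (PySem.List.pyGet? p2 0).bind fun b0 =>
  (pvLine (decide (L1 > 0 ∧ L2 > 0)) p1 p2 1 1 (a0 * b0)).bind fun n =>
  (pvLine (decide (L1 > 1 ∧ L2 > 1)) p1 p2 2 2 n).bind fun n =>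
  pvLine (decide (L1 > 2 ∧ L2 > 2)) p1 p2 3 3 n

-- A's '# count paths leading to l = 1' section
def pvBlock1 (L1 L2 : Int) (sym : Bool) (p1 p2 : List Int) (n : Int) : Option Int :=
  (pvLine (decide (L1 > 0)) p1 p2 1 0 n).bind fun n =>
  (pvLine (decide (L1 > 1 ∧ L2 > 0)) p1 p2 2 1 n).bind fun n =>
  (pvLine (decide (L1 > 2 ∧ L2 > 1)) p1 p2 3 2 n).bind fun n =>
  (pvLine (!sym && decide (L2 > 0)) p1 p2 0 1 n).bind fun n =>
  (pvLine (!sym && decide (L1 > 0 ∧ L2 > 1)) p1 p2 1 2 n).bind fun n =>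
  pvLine (!sym && decide (L1 > 1 ∧ L2 > 2)) p1 p2 2 3 n

-- A's '# count paths leading to l=2' section
def pvBlock2 (L1 L2 : Int) (sym : Bool) (p1 p2 : List Int) (n : Int) : Option Int :=
  (pvLine (decide (L1 > 1)) p1 p2 2 0 n).bind fun n =>
  (pvLine (decide (L1 > 0 ∧ L2 > 0)) p1 p2 1 1 n).bind fun n =>
  (pvLine (decide (L1 > 1 ∧ L2 > 1)) p1 p2 2 2 n).bind fun n =>
  (pvLine (decide (L1 > 2 ∧ L2 > 2)) p1 p2 3 3 n).bind fun n =>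
  (pvLine (decide (L1 > 2 ∧ L2 > 0)) p1 p2 3 1 n).bind fun n =>
  (pvLine (!sym && decide (L2 > 1)) p1 p2 0 2 n).bind fun n =>
  pvLine (!sym && decide (L1 > 0 ∧ L2 > 2)) p1 p2 1 3 n

-- A's '# count paths leading to l=3' section
def pvBlock3 (L1 L2 : Int) (sym : Bool) (p1 p2 : List Int) (n : Int) : Option Int :=
  (pvLine (decide (L1 > 2)) p1 p2 3 0 n).bind fun n =>
  (pvLine (decide (L1 > 1 ∧ L2 > 0)) p1 p2 2 1 n).bind fun n =>
  (pvLine (decide (L1 > 2 ∧ L2 > 1)) p1 p2 3 2 n).bind fun n =>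
  (pvLine (!sym && decide (L2 > 2)) p1 p2 0 3 n).bind fun n =>
  (pvLine (!sym && decide (L1 > 0 ∧ L2 > 1)) p1 p2 1 2 n).bind fun n =>
  pvLine (!sym && decide (L1 > 1 ∧ L2 > 2)) p1 p2 2 3 n

-- A's straight-line body: the four sections in order, each followed by its early return
def pvChainA (L1 L2 O : Int) (sym : Bool) (p1 p2 : List Int) : Option Int :=
  (pvBlock0 L1 L2 p1 p2).bind fun n =>
  if O = 0 then some n else
  (pvBlock1 L1 L2 sym p1 p2 n).bind fun n =>
  if O = 1 then some n else
  (pvBlock2 L1 L2 sym p1 p2 n).bind fun n =>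
  if O = 2 then some n else
  (pvBlock3 L1 L2 sym p1 p2 n).bind fun n =>
  if O = 3 then some n else none

def get_n_paths_py (in1_l_max : Int) (in2_l_max : Int) (out_l_max : Int) (in1_paths : Option (List Int)) (in2_paths : Option (List Int)) (symmetric_product : Bool) : Option Int :=
  let p1 := match in1_paths with
    | some l => l
    | none => (PySem.List.pyRange 0 (in1_l_max + 1) 1).map (fun _ => (1 : Int))
  let p2 := match in2_paths with
    | some l => l
    | none => (PySem.List.pyRange 0 (in2_l_max + 1) 1).map (fun _ => (1 : Int))
  pvChainA in1_l_max in2_l_max out_l_max symmetric_product p1 p2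

-- ===== PORT B =====
-- the triangle + parity selection rule of Source B
def pvRule (out_l l1 l2 : Int) : Bool :=
  decide (|l1 - l2| ≤ out_l ∧ out_l ≤ l1 + l2 ∧ PySem.Int.mod (l1 + l2 + out_l) 2 = 0)

-- 'for l2 in range(cap2 + 1): …' of Source B
def pvInner2 (p1 p2 : List Int) (sym : Bool) (out_l l1 : Int) : List Int → Int → Option Int
  | [], n => some n
  | l2 :: rest, n =>
    if sym && decide (l2 > l1) then pvInner2 p1 p2 sym out_l l1 rest n
    else if pvRule out_l l1 l2 then
      (PySem.List.pyGet? p1 l1).bind fun a =>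
      (PySem.List.pyGet? p2 l2).bind fun b =>
      pvInner2 p1 p2 sym out_l l1 rest (n + a * b)
    else pvInner2 p1 p2 sym out_l l1 rest n

-- 'for l1 in range(cap1 + 1): …' of Source B
def pvInner1 (p1 p2 : List Int) (sym : Bool) (out_l : Int) (l2s : List Int) : List Int → Int → Option Int
  | [], n => some n
  | l1 :: rest, n => (pvInner2 p1 p2 sym out_l l1 l2s n).bind (pvInner1 p1 p2 sym out_l l2s rest)

-- 'for out_l in range(4): …' of Source B; falling off the loop returns None
def pvOuter (p1 p2 : List Int) (sym : Bool) (O : Int) (l1s l2s : List Int) : List Int → Int → Option Int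
  | [], _ => none
  | out_l :: rest, n =>
    (pvInner1 p1 p2 sym out_l l2s l1s n).bind fun n' =>
    if out_l = O then some n' else pvOuter p1 p2 sym O l1s l2s rest n'

def get_n_paths_py_alt (in1_l_max : Int) (in2_l_max : Int) (out_l_max : Int) (in1_paths : Option (List Int)) (in2_paths : Option (List Int)) (symmetric_product : Bool) : Option Int :=
  let p1 := match in1_paths with
    | some l => l
    | none => (PySem.List.pyRange 0 (in1_l_max + 1) 1).map (fun _ => (1 : Int))
  let p2 := match in2_paths with
    | some l => l
    | none => (PySem.List.pyRange 0 (in2_l_max + 1) 1).map (fun _ => (1 : Int))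
  let cap1 := min (max in1_l_max 0) 3
  let cap2 := min (max in2_l_max 0) 3
  pvOuter p1 p2 symmetric_product out_l_max
    (PySem.List.pyRange 0 (cap1 + 1) 1) (PySem.List.pyRange 0 (cap2 + 1) 1)
    (PySem.List.pyRange 0 4 1) 0

-- ===== PRECONDITION & SPEC =====
-- one side's length requirements: index 0 is always read; index i (= 1,2,3) must be in range when needed
def pvSideOK (paths : Option (List Int)) (L : Int) (need1 need2 need3 : Bool) : Bool :=
  match paths with
  | none => decide (0 ≤ L)
  | some p => decide (1 ≤ p.length) && (!need1 || decide (2 ≤ p.length))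
        && (!need2 || decide (3 ≤ p.length)) && (!need3 || decide (4 ≤ p.length))

-- Pre_ excludes exactly the inputs on which the Python A raises IndexError: a provided path list
-- too short for an index the executed branches actually read (or a default list that is empty, in1/2_l_max < 0).
def Pre_get_n_paths_py (in1_l_max : Int) (in2_l_max : Int) (out_l_max : Int) (in1_paths : Option (List Int)) (in2_paths : Option (List Int)) (symmetric_product : Bool) : Prop :=
  (pvSideOK in1_paths in1_l_max
      (decide (0 < in1_l_max ∧ (0 < in2_l_max ∨ out_l_max ≠ 0)))
      (decide (1 < in1_l_max ∧ (1 < in2_l_max ∨ (out_l_max ≠ 0 ∧ 0 < in2_l_max) ∨ (out_l_max ≠ 0 ∧ out_l_max ≠ 1))))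
      (decide (2 < in1_l_max ∧ (2 < in2_l_max ∨ (out_l_max ≠ 0 ∧ 1 < in2_l_max) ∨ (out_l_max ≠ 0 ∧ out_l_max ≠ 1 ∧ 0 < in2_l_max) ∨ (out_l_max ≠ 0 ∧ out_l_max ≠ 1 ∧ out_l_max ≠ 2))))
   && pvSideOK in2_paths in2_l_max
      (decide (0 < in2_l_max ∧ (0 < in1_l_max ∨ (out_l_max ≠ 0 ∧ symmetric_product = false))))
      (decide (1 < in2_l_max ∧ (1 < in1_l_max ∨ (out_l_max ≠ 0 ∧ symmetric_product = false ∧ 0 < in1_l_max) ∨ (out_l_max ≠ 0 ∧ out_l_max ≠ 1 ∧ symmetric_product = false))))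
      (decide (2 < in2_l_max ∧ (2 < in1_l_max ∨ (out_l_max ≠ 0 ∧ symmetric_product = false ∧ 1 < in1_l_max) ∨ (out_l_max ≠ 0 ∧ out_l_max ≠ 1 ∧ symmetric_product = false ∧ 0 < in1_l_max) ∨ (out_l_max ≠ 0 ∧ out_l_max ≠ 1 ∧ out_l_max ≠ 2 ∧ symmetric_product = false))))) = true

instance (in1_l_max : Int) (in2_l_max : Int) (out_l_max : Int) (in1_paths : Option (List Int)) (in2_paths : Option (List Int)) (symmetric_product : Bool) : Decidable (Pre_get_n_paths_py in1_l_max in2_l_max out_l_max in1_paths in2_paths symmetric_product) := by unfold Pre_get_n_paths_py; infer_instance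

def pvWitness_get_n_paths_py : Int × Int × Int × Option (List Int) × Option (List Int) × Bool := (2, 1, 1, none, some [3, 5], false)

def Spec_get_n_paths_py (in1_l_max : Int) (in2_l_max : Int) (out_l_max : Int) (in1_paths : Option (List Int)) (in2_paths : Option (List Int)) (symmetric_product : Bool) (out : Option Int) : Prop := out = get_n_paths_py_alt in1_l_max in2_l_max out_l_max in1_paths in2_paths symmetric_product
instance (in1_l_max : Int) (in2_l_max : Int) (out_l_max : Int) (in1_paths : Option (List Int)) (in2_paths : Option (List Int)) (symmetric_product : Bool) (out : Option Int) : Decidable (Spec_get_n_paths_py in1_l_max in2_l_max out_l_max in1_paths in2_paths symmetric_product out) := by unfold Spec_get_n_paths_py; infer_instance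

-- ===== CLAIM (what is proved, stated in full; the proofs are below) =====
def Claim_equal_get_n_paths_py : Prop := ∀ (in1_l_max : Int) (in2_l_max : Int) (out_l_max : Int) (in1_paths : Option (List Int)) (in2_paths : Option (List Int)) (symmetric_product : Bool), Dom_get_n_paths_py in1_l_max in2_l_max out_l_max in1_paths in2_paths symmetric_product → Pre_get_n_paths_py in1_l_max in2_l_max out_l_max in1_paths in2_paths symmetric_product → Spec_get_n_paths_py in1_l_max in2_l_max out_l_max in1_paths in2_paths symmetric_product (get_n_paths_py in1_l_max in2_l_max out_l_max in1_paths in2_paths symmetric_product)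

-- ===== LEMMAS AND PROOFS =====
theorem pvGet (xs : List Int) (i : Int) (h0 : 0 ≤ i) (h : i.toNat < xs.length) :
    PySem.List.pyGet? xs i = some (xs.getD i.toNat 0) := by
  have h2 := PySem.List.pyGet?_natCast (xs := xs) (n := i.toNat)
  rw [show ((i.toNat : Nat) : Int) = i by omega] at h2
  rw [h2, List.getElem?_eq_getElem h]
  simp [List.getD_eq_getElem?_getD, List.getElem?_eq_getElem h]

set_option maxHeartbeats 1000000

theorem pvLevel0 (L1 L2 : Int) (sym : Bool) (p1 p2 : List Int)
    (e10 : 1 ≤ p1.length) (e20 : 1 ≤ p2.length)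
    (a1 : 0 < L1 ∧ 0 < L2 → 2 ≤ p1.length)
    (a2 : 1 < L1 ∧ 1 < L2 → 3 ≤ p1.length)
    (a3 : 2 < L1 ∧ 2 < L2 → 4 ≤ p1.length)
    (b1 : 0 < L1 ∧ 0 < L2 → 2 ≤ p2.length)
    (b2 : 1 < L1 ∧ 1 < L2 → 3 ≤ p2.length)
    (b3 : 2 < L1 ∧ 2 < L2 → 4 ≤ p2.length) :
    pvBlock0 L1 L2 p1 p2 =
      pvInner1 p1 p2 sym 0 (PySem.List.pyRange 0 (min (max L2 0) 3 + 1) 1)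
        (PySem.List.pyRange 0 (min (max L1 0) 3 + 1) 1) 0 := by
  cases sym with
  | false =>
    by_cases h13 : 2 < L1 <;> by_cases h12 : 1 < L1 <;> by_cases h11 : 0 < L1 <;>
    by_cases h23 : 2 < L2 <;> by_cases h22 : 1 < L2 <;> by_cases h21 : 0 < L2 <;>
      first
      | (exfalso; omega)
      | ((first
            | rw [show min (max L1 0) 3 = (3:Int) by omega]
            | rw [show min (max L1 0) 3 = (2:Int) by omega]
            | rw [show min (max L1 0) 3 = (1:Int) by omega]
            | rw [show min (max L1 0) 3 = (0:Int) by omega]);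
         (first
            | rw [show min (max L2 0) 3 = (3:Int) by omega]
            | rw [show min (max L2 0) 3 = (2:Int) by omega]
            | rw [show min (max L2 0) 3 = (1:Int) by omega]
            | rw [show min (max L2 0) 3 = (0:Int) by omega]);
         (repeat first
            | rw [show PySem.List.pyRange 0 ((0:Int)+1) 1 = [(0:Int)] by decide]
            | rw [show PySem.List.pyRange 0 ((1:Int)+1) 1 = [(0:Int),1] by decide]
            | rw [show PySem.List.pyRange 0 ((2:Int)+1) 1 = [(0:Int),1,2] by decide]
            | rw [show PySem.List.pyRange 0 ((3:Int)+1) 1 = [(0:Int),1,2,3] by decide]);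
         simp [pvBlock0, pvInner1, pvInner2, pvLine, pvRule, h11, h12, h13, h21, h22, h23];
         (repeat first
            | rw [pvGet p1 0 (by norm_num) (by omega)]
            | rw [pvGet p1 1 (by norm_num) (by omega)]
            | rw [pvGet p1 2 (by norm_num) (by omega)]
            | rw [pvGet p1 3 (by norm_num) (by omega)]
            | rw [pvGet p2 0 (by norm_num) (by omega)]
            | rw [pvGet p2 1 (by norm_num) (by omega)]
            | rw [pvGet p2 2 (by norm_num) (by omega)]
            | rw [pvGet p2 3 (by norm_num) (by omega)]);
         all_goals (first
          | rfl
          | (simp; ring)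
          | simp))
  | true =>
    by_cases h13 : 2 < L1 <;> by_cases h12 : 1 < L1 <;> by_cases h11 : 0 < L1 <;>
    by_cases h23 : 2 < L2 <;> by_cases h22 : 1 < L2 <;> by_cases h21 : 0 < L2 <;>
      first
      | (exfalso; omega)
      | ((first
            | rw [show min (max L1 0) 3 = (3:Int) by omega]
            | rw [show min (max L1 0) 3 = (2:Int) by omega]
            | rw [show min (max L1 0) 3 = (1:Int) by omega]
            | rw [show min (max L1 0) 3 = (0:Int) by omega]);
         (first
            | rw [show min (max L2 0) 3 = (3:Int) by omega]
            | rw [show min (max L2 0) 3 = (2:Int) by omega]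
            | rw [show min (max L2 0) 3 = (1:Int) by omega]
            | rw [show min (max L2 0) 3 = (0:Int) by omega]);
         (repeat first
            | rw [show PySem.List.pyRange 0 ((0:Int)+1) 1 = [(0:Int)] by decide]
            | rw [show PySem.List.pyRange 0 ((1:Int)+1) 1 = [(0:Int),1] by decide]
            | rw [show PySem.List.pyRange 0 ((2:Int)+1) 1 = [(0:Int),1,2] by decide]
            | rw [show PySem.List.pyRange 0 ((3:Int)+1) 1 = [(0:Int),1,2,3] by decide]);
         simp [pvBlock0, pvInner1, pvInner2, pvLine, pvRule, h11, h12, h13, h21, h22, h23];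
         (repeat first
            | rw [pvGet p1 0 (by norm_num) (by omega)]
            | rw [pvGet p1 1 (by norm_num) (by omega)]
            | rw [pvGet p1 2 (by norm_num) (by omega)]
            | rw [pvGet p1 3 (by norm_num) (by omega)]
            | rw [pvGet p2 0 (by norm_num) (by omega)]
            | rw [pvGet p2 1 (by norm_num) (by omega)]
            | rw [pvGet p2 2 (by norm_num) (by omega)]
            | rw [pvGet p2 3 (by norm_num) (by omega)]);
         all_goals (first
          | rfl
          | (simp; ring)
          | simp))

theorem pvLevel1 (L1 L2 : Int) (sym : Bool) (p1 p2 : List Int)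
    (e10 : 1 ≤ p1.length) (e20 : 1 ≤ p2.length)
    (a1 : 0 < L1 → 2 ≤ p1.length)
    (a2 : 1 < L1 ∧ 0 < L2 → 3 ≤ p1.length)
    (a3 : 2 < L1 ∧ 1 < L2 → 4 ≤ p1.length)
    (b1s : 1 < L1 ∧ 0 < L2 → 2 ≤ p2.length)
    (b2s : 2 < L1 ∧ 1 < L2 → 3 ≤ p2.length)
    (b1n : sym = false → 0 < L2 → 2 ≤ p2.length)
    (b2n : sym = false → 0 < L1 ∧ 1 < L2 → 3 ≤ p2.length)
    (b3n : sym = false → 1 < L1 ∧ 2 < L2 → 4 ≤ p2.length)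
    (n : Int) :
    pvBlock1 L1 L2 sym p1 p2 n =
      pvInner1 p1 p2 sym 1 (PySem.List.pyRange 0 (min (max L2 0) 3 + 1) 1)
        (PySem.List.pyRange 0 (min (max L1 0) 3 + 1) 1) n := by
  cases sym with
  | false =>
    have b1n' := b1n rfl
    have b2n' := b2n rfl
    have b3n' := b3n rfl
    by_cases h13 : 2 < L1 <;> by_cases h12 : 1 < L1 <;> by_cases h11 : 0 < L1 <;>
    by_cases h23 : 2 < L2 <;> by_cases h22 : 1 < L2 <;> by_cases h21 : 0 < L2 <;>
      first
      | (exfalso; omega)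
      | ((first
            | rw [show min (max L1 0) 3 = (3:Int) by omega]
            | rw [show min (max L1 0) 3 = (2:Int) by omega]
            | rw [show min (max L1 0) 3 = (1:Int) by omega]
            | rw [show min (max L1 0) 3 = (0:Int) by omega]);
         (first
            | rw [show min (max L2 0) 3 = (3:Int) by omega]
            | rw [show min (max L2 0) 3 = (2:Int) by omega]
            | rw [show min (max L2 0) 3 = (1:Int) by omega]
            | rw [show min (max L2 0) 3 = (0:Int) by omega]);
         (repeat first
            | rw [show PySem.List.pyRange 0 ((0:Int)+1) 1 = [(0:Int)] by decide]
            | rw [show PySem.List.pyRange 0 ((1:Int)+1) 1 = [(0:Int),1] by decide]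
            | rw [show PySem.List.pyRange 0 ((2:Int)+1) 1 = [(0:Int),1,2] by decide]
            | rw [show PySem.List.pyRange 0 ((3:Int)+1) 1 = [(0:Int),1,2,3] by decide]);
         simp [pvBlock1, pvInner1, pvInner2, pvLine, pvRule, h11, h12, h13, h21, h22, h23];
         (repeat first
            | rw [pvGet p1 0 (by norm_num) (by omega)]
            | rw [pvGet p1 1 (by norm_num) (by omega)]
            | rw [pvGet p1 2 (by norm_num) (by omega)]
            | rw [pvGet p1 3 (by norm_num) (by omega)]
            | rw [pvGet p2 0 (by norm_num) (by omega)]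
            | rw [pvGet p2 1 (by norm_num) (by omega)]
            | rw [pvGet p2 2 (by norm_num) (by omega)]
            | rw [pvGet p2 3 (by norm_num) (by omega)]);
         all_goals (first
          | rfl
          | (simp; ring)
          | simp))
  | true =>
    by_cases h13 : 2 < L1 <;> by_cases h12 : 1 < L1 <;> by_cases h11 : 0 < L1 <;>
    by_cases h23 : 2 < L2 <;> by_cases h22 : 1 < L2 <;> by_cases h21 : 0 < L2 <;>
      first
      | (exfalso; omega)
      | ((first
            | rw [show min (max L1 0) 3 = (3:Int) by omega]
            | rw [show min (max L1 0) 3 = (2:Int) by omega]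
            | rw [show min (max L1 0) 3 = (1:Int) by omega]
            | rw [show min (max L1 0) 3 = (0:Int) by omega]);
         (first
            | rw [show min (max L2 0) 3 = (3:Int) by omega]
            | rw [show min (max L2 0) 3 = (2:Int) by omega]
            | rw [show min (max L2 0) 3 = (1:Int) by omega]
            | rw [show min (max L2 0) 3 = (0:Int) by omega]);
         (repeat first
            | rw [show PySem.List.pyRange 0 ((0:Int)+1) 1 = [(0:Int)] by decide]
            | rw [show PySem.List.pyRange 0 ((1:Int)+1) 1 = [(0:Int),1] by decide]
            | rw [show PySem.List.pyRange 0 ((2:Int)+1) 1 = [(0:Int),1,2] by decide]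
            | rw [show PySem.List.pyRange 0 ((3:Int)+1) 1 = [(0:Int),1,2,3] by decide]);
         simp [pvBlock1, pvInner1, pvInner2, pvLine, pvRule, h11, h12, h13, h21, h22, h23];
         (repeat first
            | rw [pvGet p1 0 (by norm_num) (by omega)]
            | rw [pvGet p1 1 (by norm_num) (by omega)]
            | rw [pvGet p1 2 (by norm_num) (by omega)]
            | rw [pvGet p1 3 (by norm_num) (by omega)]
            | rw [pvGet p2 0 (by norm_num) (by omega)]
            | rw [pvGet p2 1 (by norm_num) (by omega)]
            | rw [pvGet p2 2 (by norm_num) (by omega)]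
            | rw [pvGet p2 3 (by norm_num) (by omega)]);
         all_goals (first
          | rfl
          | (simp; ring)
          | simp))

theorem pvLevel2 (L1 L2 : Int) (sym : Bool) (p1 p2 : List Int)
    (e10 : 1 ≤ p1.length) (e20 : 1 ≤ p2.length)
    (a1 : 0 < L1 ∧ 0 < L2 → 2 ≤ p1.length)
    (a2 : 1 < L1 → 3 ≤ p1.length)
    (a3 : 2 < L1 ∧ 0 < L2 → 4 ≤ p1.length)
    (b1 : 0 < L1 ∧ 0 < L2 → 2 ≤ p2.length)
    (b2s : 1 < L1 ∧ 1 < L2 → 3 ≤ p2.length)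
    (b3s : 2 < L1 ∧ 2 < L2 → 4 ≤ p2.length)
    (b2n : sym = false → 1 < L2 → 3 ≤ p2.length)
    (b3n : sym = false → 0 < L1 ∧ 2 < L2 → 4 ≤ p2.length)
    (n : Int) :
    pvBlock2 L1 L2 sym p1 p2 n =
      pvInner1 p1 p2 sym 2 (PySem.List.pyRange 0 (min (max L2 0) 3 + 1) 1)
        (PySem.List.pyRange 0 (min (max L1 0) 3 + 1) 1) n := by
  cases sym with
  | false =>
    have b2n' := b2n rfl
    have b3n' := b3n rfl
    by_cases h13 : 2 < L1 <;> by_cases h12 : 1 < L1 <;> by_cases h11 : 0 < L1 <;>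
    by_cases h23 : 2 < L2 <;> by_cases h22 : 1 < L2 <;> by_cases h21 : 0 < L2 <;>
      first
      | (exfalso; omega)
      | ((first
            | rw [show min (max L1 0) 3 = (3:Int) by omega]
            | rw [show min (max L1 0) 3 = (2:Int) by omega]
            | rw [show min (max L1 0) 3 = (1:Int) by omega]
            | rw [show min (max L1 0) 3 = (0:Int) by omega]);
         (first
            | rw [show min (max L2 0) 3 = (3:Int) by omega]
            | rw [show min (max L2 0) 3 = (2:Int) by omega]
            | rw [show min (max L2 0) 3 = (1:Int) by omega]
            | rw [show min (max L2 0) 3 = (0:Int) by omega]);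
         (repeat first
            | rw [show PySem.List.pyRange 0 ((0:Int)+1) 1 = [(0:Int)] by decide]
            | rw [show PySem.List.pyRange 0 ((1:Int)+1) 1 = [(0:Int),1] by decide]
            | rw [show PySem.List.pyRange 0 ((2:Int)+1) 1 = [(0:Int),1,2] by decide]
            | rw [show PySem.List.pyRange 0 ((3:Int)+1) 1 = [(0:Int),1,2,3] by decide]);
         simp [pvBlock2, pvInner1, pvInner2, pvLine, pvRule, h11, h12, h13, h21, h22, h23];
         (repeat first
            | rw [pvGet p1 0 (by norm_num) (by omega)]
            | rw [pvGet p1 1 (by norm_num) (by omega)]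
            | rw [pvGet p1 2 (by norm_num) (by omega)]
            | rw [pvGet p1 3 (by norm_num) (by omega)]
            | rw [pvGet p2 0 (by norm_num) (by omega)]
            | rw [pvGet p2 1 (by norm_num) (by omega)]
            | rw [pvGet p2 2 (by norm_num) (by omega)]
            | rw [pvGet p2 3 (by norm_num) (by omega)]);
         all_goals (first
          | rfl
          | (simp; ring)
          | simp))
  | true =>
    by_cases h13 : 2 < L1 <;> by_cases h12 : 1 < L1 <;> by_cases h11 : 0 < L1 <;>
    by_cases h23 : 2 < L2 <;> by_cases h22 : 1 < L2 <;> by_cases h21 : 0 < L2 <;>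
      first
      | (exfalso; omega)
      | ((first
            | rw [show min (max L1 0) 3 = (3:Int) by omega]
            | rw [show min (max L1 0) 3 = (2:Int) by omega]
            | rw [show min (max L1 0) 3 = (1:Int) by omega]
            | rw [show min (max L1 0) 3 = (0:Int) by omega]);
         (first
            | rw [show min (max L2 0) 3 = (3:Int) by omega]
            | rw [show min (max L2 0) 3 = (2:Int) by omega]
            | rw [show min (max L2 0) 3 = (1:Int) by omega]
            | rw [show min (max L2 0) 3 = (0:Int) by omega]);
         (repeat first
            | rw [show PySem.List.pyRange 0 ((0:Int)+1) 1 = [(0:Int)] by decide]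
            | rw [show PySem.List.pyRange 0 ((1:Int)+1) 1 = [(0:Int),1] by decide]
            | rw [show PySem.List.pyRange 0 ((2:Int)+1) 1 = [(0:Int),1,2] by decide]
            | rw [show PySem.List.pyRange 0 ((3:Int)+1) 1 = [(0:Int),1,2,3] by decide]);
         simp [pvBlock2, pvInner1, pvInner2, pvLine, pvRule, h11, h12, h13, h21, h22, h23];
         (repeat first
            | rw [pvGet p1 0 (by norm_num) (by omega)]
            | rw [pvGet p1 1 (by norm_num) (by omega)]
            | rw [pvGet p1 2 (by norm_num) (by omega)]
            | rw [pvGet p1 3 (by norm_num) (by omega)]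
            | rw [pvGet p2 0 (by norm_num) (by omega)]
            | rw [pvGet p2 1 (by norm_num) (by omega)]
            | rw [pvGet p2 2 (by norm_num) (by omega)]
            | rw [pvGet p2 3 (by norm_num) (by omega)]);
         all_goals (first
          | rfl
          | (simp; ring)
          | simp))

theorem pvLevel3 (L1 L2 : Int) (sym : Bool) (p1 p2 : List Int)
    (e10 : 1 ≤ p1.length) (e20 : 1 ≤ p2.length)
    (a2 : 1 < L1 ∧ 0 < L2 → 3 ≤ p1.length)
    (a3 : 2 < L1 → 4 ≤ p1.length)
    (b1 : 1 < L1 ∧ 0 < L2 → 2 ≤ p2.length)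
    (b2s : 2 < L1 ∧ 1 < L2 → 3 ≤ p2.length)
    (a1n : sym = false → 0 < L1 ∧ 1 < L2 → 2 ≤ p1.length)
    (b2n : sym = false → 0 < L1 ∧ 1 < L2 → 3 ≤ p2.length)
    (b3n : sym = false → 2 < L2 → 4 ≤ p2.length)
    (n : Int) :
    pvBlock3 L1 L2 sym p1 p2 n =
      pvInner1 p1 p2 sym 3 (PySem.List.pyRange 0 (min (max L2 0) 3 + 1) 1)
        (PySem.List.pyRange 0 (min (max L1 0) 3 + 1) 1) n := by
  cases sym with
  | false =>
    have a1n' := a1n rfl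
    have b2n' := b2n rfl
    have b3n' := b3n rfl
    by_cases h13 : 2 < L1 <;> by_cases h12 : 1 < L1 <;> by_cases h11 : 0 < L1 <;>
    by_cases h23 : 2 < L2 <;> by_cases h22 : 1 < L2 <;> by_cases h21 : 0 < L2 <;>
      first
      | (exfalso; omega)
      | ((first
            | rw [show min (max L1 0) 3 = (3:Int) by omega]
            | rw [show min (max L1 0) 3 = (2:Int) by omega]
            | rw [show min (max L1 0) 3 = (1:Int) by omega]
            | rw [show min (max L1 0) 3 = (0:Int) by omega]);
         (first
            | rw [show min (max L2 0) 3 = (3:Int) by omega]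
            | rw [show min (max L2 0) 3 = (2:Int) by omega]
            | rw [show min (max L2 0) 3 = (1:Int) by omega]
            | rw [show min (max L2 0) 3 = (0:Int) by omega]);
         (repeat first
            | rw [show PySem.List.pyRange 0 ((0:Int)+1) 1 = [(0:Int)] by decide]
            | rw [show PySem.List.pyRange 0 ((1:Int)+1) 1 = [(0:Int),1] by decide]
            | rw [show PySem.List.pyRange 0 ((2:Int)+1) 1 = [(0:Int),1,2] by decide]
            | rw [show PySem.List.pyRange 0 ((3:Int)+1) 1 = [(0:Int),1,2,3] by decide]);
         simp [pvBlock3, pvInner1, pvInner2, pvLine, pvRule, h11, h12, h13, h21, h22, h23];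
         (repeat first
            | rw [pvGet p1 0 (by norm_num) (by omega)]
            | rw [pvGet p1 1 (by norm_num) (by omega)]
            | rw [pvGet p1 2 (by norm_num) (by omega)]
            | rw [pvGet p1 3 (by norm_num) (by omega)]
            | rw [pvGet p2 0 (by norm_num) (by omega)]
            | rw [pvGet p2 1 (by norm_num) (by omega)]
            | rw [pvGet p2 2 (by norm_num) (by omega)]
            | rw [pvGet p2 3 (by norm_num) (by omega)]);
         all_goals (first
          | rfl
          | (simp; ring)
          | simp))
  | true =>
    by_cases h13 : 2 < L1 <;> by_cases h12 : 1 < L1 <;> by_cases h11 : 0 < L1 <;>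
    by_cases h23 : 2 < L2 <;> by_cases h22 : 1 < L2 <;> by_cases h21 : 0 < L2 <;>
      first
      | (exfalso; omega)
      | ((first
            | rw [show min (max L1 0) 3 = (3:Int) by omega]
            | rw [show min (max L1 0) 3 = (2:Int) by omega]
            | rw [show min (max L1 0) 3 = (1:Int) by omega]
            | rw [show min (max L1 0) 3 = (0:Int) by omega]);
         (first
            | rw [show min (max L2 0) 3 = (3:Int) by omega]
            | rw [show min (max L2 0) 3 = (2:Int) by omega]
            | rw [show min (max L2 0) 3 = (1:Int) by omega]
            | rw [show min (max L2 0) 3 = (0:Int) by omega]);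
         (repeat first
            | rw [show PySem.List.pyRange 0 ((0:Int)+1) 1 = [(0:Int)] by decide]
            | rw [show PySem.List.pyRange 0 ((1:Int)+1) 1 = [(0:Int),1] by decide]
            | rw [show PySem.List.pyRange 0 ((2:Int)+1) 1 = [(0:Int),1,2] by decide]
            | rw [show PySem.List.pyRange 0 ((3:Int)+1) 1 = [(0:Int),1,2,3] by decide]);
         simp [pvBlock3, pvInner1, pvInner2, pvLine, pvRule, h11, h12, h13, h21, h22, h23];
         (repeat first
            | rw [pvGet p1 0 (by norm_num) (by omega)]
            | rw [pvGet p1 1 (by norm_num) (by omega)]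
            | rw [pvGet p1 2 (by norm_num) (by omega)]
            | rw [pvGet p1 3 (by norm_num) (by omega)]
            | rw [pvGet p2 0 (by norm_num) (by omega)]
            | rw [pvGet p2 1 (by norm_num) (by omega)]
            | rw [pvGet p2 2 (by norm_num) (by omega)]
            | rw [pvGet p2 3 (by norm_num) (by omega)]);
         all_goals (first
          | rfl
          | (simp; ring)
          | simp))

theorem pvCore (L1 L2 O : Int) (sym : Bool) (p1 p2 : List Int)
    (e10 : 1 ≤ p1.length) (e20 : 1 ≤ p2.length)
    (e11 : 0 < L1 ∧ (0 < L2 ∨ O ≠ 0) → 2 ≤ p1.length)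
    (e12 : 1 < L1 ∧ (1 < L2 ∨ (O ≠ 0 ∧ 0 < L2) ∨ (O ≠ 0 ∧ O ≠ 1)) → 3 ≤ p1.length)
    (e13 : 2 < L1 ∧ (2 < L2 ∨ (O ≠ 0 ∧ 1 < L2) ∨ (O ≠ 0 ∧ O ≠ 1 ∧ 0 < L2) ∨ (O ≠ 0 ∧ O ≠ 1 ∧ O ≠ 2)) → 4 ≤ p1.length)
    (e21 : 0 < L2 ∧ (0 < L1 ∨ (O ≠ 0 ∧ sym = false)) → 2 ≤ p2.length)
    (e22 : 1 < L2 ∧ (1 < L1 ∨ (O ≠ 0 ∧ sym = false ∧ 0 < L1) ∨ (O ≠ 0 ∧ O ≠ 1 ∧ sym = false)) → 3 ≤ p2.length)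
    (e23 : 2 < L2 ∧ (2 < L1 ∨ (O ≠ 0 ∧ sym = false ∧ 1 < L1) ∨ (O ≠ 0 ∧ O ≠ 1 ∧ sym = false ∧ 0 < L1) ∨ (O ≠ 0 ∧ O ≠ 1 ∧ O ≠ 2 ∧ sym = false)) → 4 ≤ p2.length) :
    pvChainA L1 L2 O sym p1 p2 =
      pvOuter p1 p2 sym O (PySem.List.pyRange 0 (min (max L1 0) 3 + 1) 1)
        (PySem.List.pyRange 0 (min (max L2 0) 3 + 1) 1) (PySem.List.pyRange 0 4 1) 0 := by
  cases sym with
  | false =>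
    simp only [eq_self_iff_true, and_true, true_and] at e21 e22 e23
    by_cases hO0 : O = 0
    · have E0 := pvLevel0 L1 L2 false p1 p2 e10 e20 (by omega) (by omega) (by omega) (by omega) (by omega) (by omega)
      simp [pvChainA, pvOuter, show PySem.List.pyRange 0 (4:Int) 1 = [(0:Int),1,2,3] by decide, E0, hO0]
    · by_cases hO1 : O = 1
      · have E0 := pvLevel0 L1 L2 false p1 p2 e10 e20 (by omega) (by omega) (by omega) (by omega) (by omega) (by omega)
        have E1 := pvLevel1 L1 L2 false p1 p2 e10 e20 (by omega) (by omega) (by omega) (by omega) (by omega) (fun _ => by omega) (fun _ => by omega) (fun _ => by omega)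
        simp [pvChainA, pvOuter, show PySem.List.pyRange 0 (4:Int) 1 = [(0:Int),1,2,3] by decide, E0, E1, hO0, hO1, (show ¬((0:Int) = O) from fun hh => hO0 hh.symm)]
      · by_cases hO2 : O = 2
        · have E0 := pvLevel0 L1 L2 false p1 p2 e10 e20 (by omega) (by omega) (by omega) (by omega) (by omega) (by omega)
          have E1 := pvLevel1 L1 L2 false p1 p2 e10 e20 (by omega) (by omega) (by omega) (by omega) (by omega) (fun _ => by omega) (fun _ => by omega) (fun _ => by omega)
          have E2 := pvLevel2 L1 L2 false p1 p2 e10 e20 (by omega) (by omega) (by omega) (by omega) (by omega) (by omega) (fun _ => by omega) (fun _ => by omega)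
          simp [pvChainA, pvOuter, show PySem.List.pyRange 0 (4:Int) 1 = [(0:Int),1,2,3] by decide, E0, E1, E2, hO0, hO1, hO2, (show ¬((0:Int) = O) from fun hh => hO0 hh.symm), (show ¬((1:Int) = O) from fun hh => hO1 hh.symm)]
        · by_cases hO3 : O = 3
          · have E0 := pvLevel0 L1 L2 false p1 p2 e10 e20 (by omega) (by omega) (by omega) (by omega) (by omega) (by omega)
            have E1 := pvLevel1 L1 L2 false p1 p2 e10 e20 (by omega) (by omega) (by omega) (by omega) (by omega) (fun _ => by omega) (fun _ => by omega) (fun _ => by omega)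
            have E2 := pvLevel2 L1 L2 false p1 p2 e10 e20 (by omega) (by omega) (by omega) (by omega) (by omega) (by omega) (fun _ => by omega) (fun _ => by omega)
            have E3 := pvLevel3 L1 L2 false p1 p2 e10 e20 (by omega) (by omega) (by omega) (by omega) (fun _ => by omega) (fun _ => by omega) (fun _ => by omega)
            simp [pvChainA, pvOuter, show PySem.List.pyRange 0 (4:Int) 1 = [(0:Int),1,2,3] by decide, E0, E1, E2, E3, hO0, hO1, hO2, hO3, (show ¬((0:Int) = O) from fun hh => hO0 hh.symm), (show ¬((1:Int) = O) from fun hh => hO1 hh.symm), (show ¬((2:Int) = O) from fun hh => hO2 hh.symm)]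
          · have E0 := pvLevel0 L1 L2 false p1 p2 e10 e20 (by omega) (by omega) (by omega) (by omega) (by omega) (by omega)
            have E1 := pvLevel1 L1 L2 false p1 p2 e10 e20 (by omega) (by omega) (by omega) (by omega) (by omega) (fun _ => by omega) (fun _ => by omega) (fun _ => by omega)
            have E2 := pvLevel2 L1 L2 false p1 p2 e10 e20 (by omega) (by omega) (by omega) (by omega) (by omega) (by omega) (fun _ => by omega) (fun _ => by omega)
            have E3 := pvLevel3 L1 L2 false p1 p2 e10 e20 (by omega) (by omega) (by omega) (by omega) (fun _ => by omega) (fun _ => by omega) (fun _ => by omega)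
            simp [pvChainA, pvOuter, show PySem.List.pyRange 0 (4:Int) 1 = [(0:Int),1,2,3] by decide, E0, E1, E2, E3, hO0, hO1, hO2, hO3, (show ¬((0:Int) = O) from fun hh => hO0 hh.symm), (show ¬((1:Int) = O) from fun hh => hO1 hh.symm), (show ¬((2:Int) = O) from fun hh => hO2 hh.symm), (show ¬((3:Int) = O) from fun hh => hO3 hh.symm)]
  | true =>
    simp only [show (true = false) = False by simp, and_false, false_and, false_or, or_false] at e21 e22 e23
    by_cases hO0 : O = 0
    · have E0 := pvLevel0 L1 L2 true p1 p2 e10 e20 (by omega) (by omega) (by omega) (by omega) (by omega) (by omega)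
      simp [pvChainA, pvOuter, show PySem.List.pyRange 0 (4:Int) 1 = [(0:Int),1,2,3] by decide, E0, hO0]
    · by_cases hO1 : O = 1
      · have E0 := pvLevel0 L1 L2 true p1 p2 e10 e20 (by omega) (by omega) (by omega) (by omega) (by omega) (by omega)
        have E1 := pvLevel1 L1 L2 true p1 p2 e10 e20 (by omega) (by omega) (by omega) (by omega) (by omega) (fun hh => nomatch hh) (fun hh => nomatch hh) (fun hh => nomatch hh)
        simp [pvChainA, pvOuter, show PySem.List.pyRange 0 (4:Int) 1 = [(0:Int),1,2,3] by decide, E0, E1, hO0, hO1, (show ¬((0:Int) = O) from fun hh => hO0 hh.symm)]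
      · by_cases hO2 : O = 2
        · have E0 := pvLevel0 L1 L2 true p1 p2 e10 e20 (by omega) (by omega) (by omega) (by omega) (by omega) (by omega)
          have E1 := pvLevel1 L1 L2 true p1 p2 e10 e20 (by omega) (by omega) (by omega) (by omega) (by omega) (fun hh => nomatch hh) (fun hh => nomatch hh) (fun hh => nomatch hh)
          have E2 := pvLevel2 L1 L2 true p1 p2 e10 e20 (by omega) (by omega) (by omega) (by omega) (by omega) (by omega) (fun hh => nomatch hh) (fun hh => nomatch hh)
          simp [pvChainA, pvOuter, show PySem.List.pyRange 0 (4:Int) 1 = [(0:Int),1,2,3] by decide, E0, E1, E2, hO0, hO1, hO2, (show ¬((0:Int) = O) from fun hh => hO0 hh.symm), (show ¬((1:Int) = O) from fun hh => hO1 hh.symm)]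
        · by_cases hO3 : O = 3
          · have E0 := pvLevel0 L1 L2 true p1 p2 e10 e20 (by omega) (by omega) (by omega) (by omega) (by omega) (by omega)
            have E1 := pvLevel1 L1 L2 true p1 p2 e10 e20 (by omega) (by omega) (by omega) (by omega) (by omega) (fun hh => nomatch hh) (fun hh => nomatch hh) (fun hh => nomatch hh)
            have E2 := pvLevel2 L1 L2 true p1 p2 e10 e20 (by omega) (by omega) (by omega) (by omega) (by omega) (by omega) (fun hh => nomatch hh) (fun hh => nomatch hh)
            have E3 := pvLevel3 L1 L2 true p1 p2 e10 e20 (by omega) (by omega) (by omega) (by omega) (fun hh => nomatch hh) (fun hh => nomatch hh) (fun hh => nomatch hh)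
            simp [pvChainA, pvOuter, show PySem.List.pyRange 0 (4:Int) 1 = [(0:Int),1,2,3] by decide, E0, E1, E2, E3, hO0, hO1, hO2, hO3, (show ¬((0:Int) = O) from fun hh => hO0 hh.symm), (show ¬((1:Int) = O) from fun hh => hO1 hh.symm), (show ¬((2:Int) = O) from fun hh => hO2 hh.symm)]
          · have E0 := pvLevel0 L1 L2 true p1 p2 e10 e20 (by omega) (by omega) (by omega) (by omega) (by omega) (by omega)
            have E1 := pvLevel1 L1 L2 true p1 p2 e10 e20 (by omega) (by omega) (by omega) (by omega) (by omega) (fun hh => nomatch hh) (fun hh => nomatch hh) (fun hh => nomatch hh)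
            have E2 := pvLevel2 L1 L2 true p1 p2 e10 e20 (by omega) (by omega) (by omega) (by omega) (by omega) (by omega) (fun hh => nomatch hh) (fun hh => nomatch hh)
            have E3 := pvLevel3 L1 L2 true p1 p2 e10 e20 (by omega) (by omega) (by omega) (by omega) (fun hh => nomatch hh) (fun hh => nomatch hh) (fun hh => nomatch hh)
            simp [pvChainA, pvOuter, show PySem.List.pyRange 0 (4:Int) 1 = [(0:Int),1,2,3] by decide, E0, E1, E2, E3, hO0, hO1, hO2, hO3, (show ¬((0:Int) = O) from fun hh => hO0 hh.symm), (show ¬((1:Int) = O) from fun hh => hO1 hh.symm), (show ¬((2:Int) = O) from fun hh => hO2 hh.symm), (show ¬((3:Int) = O) from fun hh => hO3 hh.symm)]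

def pvResolve (paths : Option (List Int)) (L : Int) : List Int :=
  match paths with
  | some l => l
  | none => (PySem.List.pyRange 0 (L + 1) 1).map (fun _ => (1 : Int))

theorem pvSideFacts (paths : Option (List Int)) (L : Int) (P1 P2 P3 : Prop)
    [Decidable P1] [Decidable P2] [Decidable P3]
    (hok : pvSideOK paths L (decide P1) (decide P2) (decide P3) = true)
    (g1 : P1 → 0 < L) (g2 : P2 → 1 < L) (g3 : P3 → 2 < L) :
    1 ≤ (pvResolve paths L).length ∧ (P1 → 2 ≤ (pvResolve paths L).length) ∧
      (P2 → 3 ≤ (pvResolve paths L).length) ∧ (P3 → 4 ≤ (pvResolve paths L).length) := by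
  cases paths with
  | none =>
    simp only [pvSideOK, decide_eq_true_eq] at hok
    have hl : (pvResolve none L).length = (L + 1 - 0).toNat := by
      simp [pvResolve, PySem.List.length_pyRange_one]
    refine ⟨by omega, fun h => by have := g1 h; omega, fun h => by have := g2 h; omega,
      fun h => by have := g3 h; omega⟩
  | some l =>
    simp only [pvSideOK, Bool.and_eq_true, Bool.or_eq_true, Bool.not_eq_true',
      decide_eq_true_eq, decide_eq_false_iff_not] at hok
    have hr : pvResolve (some l) L = l := rfl
    rw [hr]
    exact ⟨hok.1.1.1, fun h => by tauto, fun h => by tauto, fun h => by tauto⟩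

-- ===== VERDICT (by name: the statement is the Claim_ definition above) =====
theorem get_n_paths_py_spec : Claim_equal_get_n_paths_py := by
  intro L1 L2 O p1? p2? sym _ hpre
  unfold Spec_get_n_paths_py
  unfold Pre_get_n_paths_py at hpre
  rw [Bool.and_eq_true] at hpre
  obtain ⟨h1, h2⟩ := hpre
  obtain ⟨f10, f11, f12, f13⟩ := pvSideFacts p1? L1 _ _ _ h1 (fun h => h.1) (fun h => h.1) (fun h => h.1)
  obtain ⟨f20, f21, f22, f23⟩ := pvSideFacts p2? L2 _ _ _ h2 (fun h => h.1) (fun h => h.1) (fun h => h.1)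
  show pvChainA L1 L2 O sym (pvResolve p1? L1) (pvResolve p2? L2) =
    pvOuter (pvResolve p1? L1) (pvResolve p2? L2) sym O
      (PySem.List.pyRange 0 (min (max L1 0) 3 + 1) 1)
      (PySem.List.pyRange 0 (min (max L2 0) 3 + 1) 1) (PySem.List.pyRange 0 4 1) 0
  exact pvCore L1 L2 O sym _ _ f10 f20 f11 f12 f13 f21 f22 f23
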